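-- pv_equiv track=rewrite | github.com/THU-BPM/CWBA | token_level_attack/src/attack/attack_data.py | get_entity_begin_end
-- ===== SOURCE A (Python) =====
-- def get_entity_begin_label(label_to_id):
--     return {id for label,id in label_to_id.items() if label.startswith('B-')}
--
-- def get_entity_begin_end(label_list, label_to_id):
--     begin_end_list = []
--     begin_label=get_entity_begin_label(label_to_id)
--     for begin,label in enumerate(label_list):
--         if label in begin_label:
--             end=begin+1
--             while(end<len(label_list) and label_list[end]==-100): end+=1
--             begin_end_list.append((begin,end))
--     return begin_end_list
-- ===== SOURCE B (Python) =====
-- def get_entity_begin_end(label_list, label_to_id):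
--     begin_ids = {id for label, id in label_to_id.items() if label.startswith('B-')}
--     n = len(label_list)
--     # backward pass: first_after[i] = smallest j > i with label_list[j] != -100, else n
--     first_after = [n] * n
--     nxt = n
--     for i in range(n - 1, -1, -1):
--         first_after[i] = nxt
--         if label_list[i] != -100:
--             nxt = i
--     return [(i, fa) for i, (label, fa) in enumerate(zip(label_list, first_after))
--             if label in begin_ids]
-- ===== Notes on version B (the rewrite author's own statement) =====
-- stated objective: alternative
-- what changed: Replaces the inline forward while-scan over -100 runs (restarted at every begin label) with a single backward pass that precomputes a next-non-(-100) suffix table, followed by a flat comprehension emitting (begin, first_after[begin]).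
import Mathlib
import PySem

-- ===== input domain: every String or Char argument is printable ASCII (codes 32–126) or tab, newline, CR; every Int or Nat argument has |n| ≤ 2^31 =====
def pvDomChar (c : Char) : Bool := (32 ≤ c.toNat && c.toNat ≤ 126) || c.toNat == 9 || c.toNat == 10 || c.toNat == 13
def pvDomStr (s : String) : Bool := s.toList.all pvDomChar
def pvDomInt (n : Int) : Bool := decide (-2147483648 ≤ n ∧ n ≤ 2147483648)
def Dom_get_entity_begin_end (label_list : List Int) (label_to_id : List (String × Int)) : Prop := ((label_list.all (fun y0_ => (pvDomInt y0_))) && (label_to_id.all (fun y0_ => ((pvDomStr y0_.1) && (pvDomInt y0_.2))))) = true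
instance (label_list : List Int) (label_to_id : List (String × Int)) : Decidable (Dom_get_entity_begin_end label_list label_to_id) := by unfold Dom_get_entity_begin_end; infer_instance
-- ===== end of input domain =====

-- B replaces A's restarted forward while-scan over -100 runs with a precomputed
-- backward-pass "next non-(-100)" suffix table and a flat emit pass (alternative decomposition).

-- ===== PORT A =====
-- set comprehension {id for label,id in label_to_id.items() if label.startswith('B-')}
def get_entity_begin_label (label_to_id : List (String × Int)) : PySem.Set Int :=
  label_to_id.foldl
    (fun s p => if PySem.Str.startswith p.1 "B-" then PySem.Set.add s p.2 else s)
    PySem.Set.empty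

-- the inline 'while end < len(label_list) and label_list[end] == -100: end += 1',
-- as a structural walk over the remaining suffix label_list[e:]
-- (exact for 0 ≤ e; every call site has e = begin + 1 ≥ 1)
def pvScanAux (rest : List Int) (e : Int) : Int :=
  match rest with
  | [] => e
  | x :: r => if x = -100 then pvScanAux r (e + 1) else e

def pvScan (label_list : List Int) (e : Int) : Int :=
  pvScanAux (label_list.drop e.toNat) e

def get_entity_begin_end (label_list : List Int) (label_to_id : List (String × Int)) : List (Int × Int) :=
  let begin_label := get_entity_begin_label label_to_id
  (PySem.List.enumerate label_list).foldl
    (fun acc p =>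
      if PySem.Set.contains begin_label p.2 then acc ++ [(p.1, pvScan label_list (p.1 + 1))]
      else acc)
    []

-- ===== PORT B =====
def get_entity_begin_end_alt (label_list : List Int) (label_to_id : List (String × Int)) : List (Int × Int) :=
  -- same set comprehension as in Source B
  let beginSet := label_to_id.foldl
    (fun s p => if PySem.Str.startswith p.1 "B-" then PySem.Set.add s p.2 else s)
    PySem.Set.empty
  let n : Int := label_list.length
  -- backward pass 'for i in range(n-1, -1, -1): first_after[i] = nxt; if ll[i] != -100: nxt = i'
  -- as a foldr over enumerate(label_list) carrying (table-so-far, nxt)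
  let first_after :=
    ((PySem.List.enumerate label_list).foldr
      (fun p st => (st.2 :: st.1, if p.2 ≠ -100 then p.1 else st.2))
      (([] : List Int), n)).1
  -- [(i, fa) for i,(label,fa) in enumerate(zip(label_list, first_after)) if label in begin_ids]
  (PySem.List.enumerate (label_list.zip first_after)).filterMap
    (fun p => if PySem.Set.contains beginSet p.2.1 then some (p.1, p.2.2) else none)

-- ===== PRECONDITION & SPEC =====
def Spec_get_entity_begin_end (label_list : List Int) (label_to_id : List (String × Int)) (out : List (Int × Int)) : Prop := out = get_entity_begin_end_alt label_list label_to_id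
instance (label_list : List Int) (label_to_id : List (String × Int)) (out : List (Int × Int)) : Decidable (Spec_get_entity_begin_end label_list label_to_id out) := by unfold Spec_get_entity_begin_end; infer_instance

-- ===== CLAIM (what is proved, stated in full; the proofs are below) =====
def Claim_equal_get_entity_begin_end : Prop := ∀ (label_list : List Int) (label_to_id : List (String × Int)), Dom_get_entity_begin_end label_list label_to_id → Spec_get_entity_begin_end label_list label_to_id (get_entity_begin_end label_list label_to_id)

-- ===== LEMMAS AND PROOFS =====

-- unfolding pvScan at an in-range / out-of-range natural index
lemma pvScan_of_le (ll : List Int) (j : Nat) (h : ll.length ≤ j) :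
    pvScan ll (j : Int) = (j : Int) := by
  unfold pvScan
  rw [Int.toNat_natCast, List.drop_eq_nil_iff.mpr (by omega)]
  rfl

lemma pvScan_of_lt (ll : List Int) (j : Nat) (h : j < ll.length) :
    pvScan ll (j : Int) = if ll[j] = -100 then pvScan ll ((j + 1 : Nat) : Int) else (j : Int) := by
  unfold pvScan
  rw [Int.toNat_natCast, Int.toNat_natCast, List.drop_eq_getElem_cons h]
  by_cases hm : ll[j] = -100
  · simp [pvScanAux, hm]
  · simp [pvScanAux, hm]

-- the backward fold, characterized on a suffix of the list
lemma pvFold_drop (ll : List Int) (j : Nat) (hj : j ≤ ll.length) :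
    (PySem.List.enumerate (ll.drop j) (j : Int)).foldr
        (fun p st => (st.2 :: st.1, if p.2 ≠ -100 then p.1 else st.2))
        (([] : List Int), (ll.length : Int))
      = ((List.range (ll.length - j)).map (fun k => pvScan ll ((j + k + 1 : Nat) : Int)),
         pvScan ll (j : Int)) := by
  induction hd : ll.length - j generalizing j with
  | zero =>
    have hjn : j = ll.length := by omega
    subst hjn
    rw [List.drop_length, PySem.List.enumerate_nil]
    simp only [List.foldr_nil, List.range_zero, List.map_nil]
    rw [pvScan_of_le ll ll.length le_rfl]
  | succ d ih =>
    have hjlt : j < ll.length := by omega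
    have hdrop : ll.drop j = ll[j] :: ll.drop (j + 1) := List.drop_eq_getElem_cons hjlt
    have hc : ((j : Int) + 1) = ((j + 1 : Nat) : Int) := by push_cast; ring
    rw [hdrop, PySem.List.enumerate_cons, List.foldr_cons, hc,
        ih (j + 1) (by omega) (by omega)]
    rw [Prod.ext_iff]
    dsimp only
    constructor
    · rw [List.range_succ_eq_map, List.map_cons, List.map_map]
      simp only [List.cons.injEq]
      refine ⟨by norm_num, ?_⟩
      apply List.map_congr_left
      intro k _
      simp only [Function.comp_apply]
      congr 1
      omega
    · rw [pvScan_of_lt ll j hjlt]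
      by_cases hm : ll[j] = -100
      · rw [if_neg (by simp [hm]), if_pos hm]
      · rw [if_pos (by simp [hm]), if_neg hm]

-- enumerate(zip ll first_after) as a map over enumerate ll
lemma enumerate_zip_fa (ll : List Int) :
    PySem.List.enumerate
        (ll.zip ((List.range ll.length).map (fun k => pvScan ll ((k + 1 : Nat) : Int)))) 0
      = (PySem.List.enumerate ll 0).map
          (fun p => (p.1, (p.2, pvScan ll (p.1 + 1)))) := by
  apply List.ext_getElem
  · simp [PySem.List.length_enumerate]
  · intro k h1 h2
    have hk : k < ll.length := by
      simpa [PySem.List.length_enumerate] using h2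
    simp only [PySem.List.getElem_enumerate, List.getElem_map, List.getElem_zip,
      List.getElem_range]
    push_cast
    ring_nf

lemma map_filter_eq_filterMap {α β : Type} (p : α → Bool) (f : α → β) (l : List α) :
    (l.filter p).map f = l.filterMap (fun a => if p a then some (f a) else none) := by
  induction l with
  | nil => simp
  | cons x xs ih =>
    by_cases h : p x <;> simp [h, ih]

-- ===== VERDICT (by name: the statement is the Claim_ definition above) =====
theorem get_entity_begin_end_spec : Claim_equal_get_entity_begin_end := by
  intro ll ltid _
  unfold Spec_get_entity_begin_end get_entity_begin_end get_entity_begin_end_alt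
    get_entity_begin_label
  dsimp only
  rw [PySem.List.foldl_append_if
        (p := fun p : Int × Int =>
          PySem.Set.contains
            (ltid.foldl (fun s q => if PySem.Str.startswith q.1 "B-" then PySem.Set.add s q.2 else s) PySem.Set.empty)
            p.2)
        (f := fun p : Int × Int => (p.1, pvScan ll (p.1 + 1)))]
  have hfa := pvFold_drop ll 0 (by omega)
  simp only [List.drop_zero, Nat.sub_zero, Nat.zero_add, Nat.cast_zero] at hfa
  rw [hfa, enumerate_zip_fa ll, List.filterMap_map, map_filter_eq_filterMap]
  simp [Function.comp]
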